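-- pv_equiv track=rewrite | github.com/rmk135/schemagen | interview_task.py | calculate_total_runtime
-- ===== SOURCE A (Python) =====
-- JOB_RUNTIME = 1
--
-- JOB_COOLDOWN = 5
--
-- def calculate_total_runtime(jobs):
--     result = len(jobs) * JOB_RUNTIME
--
--     for i, job in enumerate(jobs):
--         lower_i = i - JOB_COOLDOWN if i >= JOB_COOLDOWN else 0
--         last_coincidence = jobs.rfind(job, lower_i, i)
--
--         if last_coincidence == -1:
--             continue
--
--         result += JOB_COOLDOWN - ((i - last_coincidence - 1) * JOB_RUNTIME)
--
--     return result
-- ===== SOURCE B (Python) =====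
-- JOB_RUNTIME = 1
--
-- JOB_COOLDOWN = 5
--
-- def calculate_total_runtime(jobs):
--     positions = {}
--     for i, job in enumerate(jobs):
--         positions.setdefault(job, []).append(i)
--     result = len(jobs) * JOB_RUNTIME
--     for pos_list in positions.values():
--         for prev, cur in zip(pos_list, pos_list[1:]):
--             if cur - prev <= JOB_COOLDOWN:
--                 result += JOB_COOLDOWN - (cur - prev - 1) * JOB_RUNTIME
--     return result
-- ===== Notes on version B (the rewrite author's own statement) =====
-- stated objective: alternative
-- what changed: Two staged passes instead of one backward-scanning pass: first group every character's ordered occurrence positions into a dict, then sum a cooldown bonus over consecutive position pairs per group, instead of an rfind window scan at each index.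
import Mathlib
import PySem

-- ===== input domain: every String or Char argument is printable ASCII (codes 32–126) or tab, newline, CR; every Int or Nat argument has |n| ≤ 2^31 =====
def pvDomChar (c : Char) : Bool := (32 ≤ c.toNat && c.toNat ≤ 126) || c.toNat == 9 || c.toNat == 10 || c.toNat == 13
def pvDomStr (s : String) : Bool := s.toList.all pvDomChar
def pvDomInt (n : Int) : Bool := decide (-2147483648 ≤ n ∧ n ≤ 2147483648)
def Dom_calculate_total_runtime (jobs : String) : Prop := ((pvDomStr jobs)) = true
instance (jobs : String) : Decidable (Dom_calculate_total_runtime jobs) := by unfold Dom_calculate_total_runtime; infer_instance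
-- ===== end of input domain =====

-- B replaces A's per-index backward window rfind by two staged passes: group each
-- character's ordered occurrence positions into a dict, then sum a cooldown bonus over
-- consecutive position pairs of each group (objective: alternative algorithm).

-- ===== PORT A =====
-- jobs.rfind(job, a, b) for a single-char needle: scan indices b-1 down to a, return the
-- first (= highest) index holding the char, else -1.  Exact for 0 ≤ a (as called here):
-- (b-1).toNat is only consulted when a < b, so the index is a genuine non-negative position.
def pyRfindChar (l : List Char) (c : Char) (a b : Int) : Int :=
  if h : b ≤ a then -1
  else if l.getD (b - 1).toNat ' ' == c then b - 1
  else pyRfindChar l c a (b - 1)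
termination_by (b - a).toNat
decreasing_by omega

def calculate_total_runtime (jobs : String) : Int :=
  let l := jobs.toList
  (PySem.List.enumerate l 0).foldl (fun result p =>
    let lower : Int := if p.1 ≥ 5 then p.1 - 5 else 0
    let last := pyRfindChar l p.2 lower p.1
    if last == -1 then result
    else result + (5 - (p.1 - last - 1) * 1))
    ((l.length : Int) * 1)

-- ===== PORT B =====
def calculate_total_runtime_alt (jobs : String) : Int :=
  let l := jobs.toList
  let positions := (PySem.List.enumerate l 0).foldl
      (fun (d : PySem.Dict Char (List Int)) p => d.modify p.2 [] (fun ps => ps ++ [p.1]))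
      PySem.Dict.empty
  positions.values.foldl
    (fun result ps =>
      (ps.zip (PySem.List.slice ps (some 1) none)).foldl
        (fun r q => if q.2 - q.1 ≤ 5 then r + (5 - (q.2 - q.1 - 1) * 1) else r)
        result)
    ((l.length : Int) * 1)

-- ===== PRECONDITION & SPEC =====
def Spec_calculate_total_runtime (jobs : String) (out : Int) : Prop := out = calculate_total_runtime_alt jobs
instance (jobs : String) (out : Int) : Decidable (Spec_calculate_total_runtime jobs out) := by unfold Spec_calculate_total_runtime; infer_instance

-- ===== CLAIM (what is proved, stated in full; the proofs are below) =====
def Claim_equal_calculate_total_runtime : Prop := ∀ (jobs : String), Dom_calculate_total_runtime jobs → Spec_calculate_total_runtime jobs (calculate_total_runtime jobs)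

-- ===== LEMMAS AND PROOFS =====

-- latest index j < k with l[j] = c
def lastOcc (l : List Char) (c : Char) : Nat → Option Nat
  | 0 => none
  | k + 1 => if l.getD k ' ' == c then some k else lastOcc l c k

-- what pyRfindChar returns, as a function of the nearest previous occurrence
def rfSpec (a : Int) : Option Nat → Int
  | some j => if a ≤ (j : Int) then (j : Int) else -1
  | none => -1

-- the cooldown bonus contributed by a consecutive pair of positions
def gBonus (p c : Int) : Int := if c - p ≤ 5 then 5 - (c - p - 1) * 1 else 0

-- the value A's loop body adds at element p of enumerate
def fA (L : List Char) (p : Int × Char) : Int :=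
  let lower : Int := if p.1 ≥ 5 then p.1 - 5 else 0
  let last := pyRfindChar L p.2 lower p.1
  if last == -1 then 0 else (5 - (p.1 - last - 1) * 1)

-- the ordered positions of character c in L
def occI (L : List Char) (c : Char) : List Int :=
  ((PySem.List.enumerate L 0).filter (fun p => p.2 == c)).map (·.1)

-- B's bonus total for one group of positions
def amt (ps : List Int) : Int := ((ps.zip ps.tail).map (fun q => gBonus q.1 q.2)).sum

theorem lastOcc_lt (l : List Char) (c : Char) (k j : Nat)
    (h : lastOcc l c k = some j) : j < k := by
  induction k with
  | zero => simp [lastOcc] at h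
  | succ k ih =>
    simp only [lastOcc] at h
    split at h
    · cases h; omega
    · exact Nat.lt_succ_of_lt (ih h)

theorem pyRfindChar_eq (l : List Char) (c : Char) (k : Nat) (a : Int) (ha : 0 ≤ a) :
    pyRfindChar l c a (k : Int) = rfSpec a (lastOcc l c k) := by
  induction k with
  | zero =>
    rw [pyRfindChar]
    simp only [Nat.cast_zero, lastOcc, rfSpec]
    rw [dif_pos ha]
  | succ k ih =>
    rw [pyRfindChar]
    have hb : ((k + 1 : Nat) : Int) - 1 = (k : Int) := by push_cast; ring
    by_cases hka : ((k + 1 : Nat) : Int) ≤ a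
    · rw [dif_pos hka]
      cases hocc : lastOcc l c (k + 1) with
      | none => simp [rfSpec]
      | some j =>
        have hjk := lastOcc_lt l c (k + 1) j hocc
        simp only [rfSpec]
        rw [if_neg (by push_cast at hka; omega)]
    · rw [dif_neg hka, hb, Int.toNat_natCast]
      simp only [lastOcc]
      by_cases hc : l.getD k ' ' == c
      · rw [if_pos hc, if_pos hc]
        simp only [rfSpec]
        rw [if_pos (by push_cast at hka; omega)]
      · rw [if_neg hc, if_neg hc]
        exact ih

-- A's per-element value in terms of the nearest previous occurrence
theorem fA_eq (L : List Char) (c : Char) (k : Nat) :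
    fA L ((k : Int), c) =
      (match lastOcc L c k with
       | some j => gBonus (j : Int) (k : Int)
       | none => 0) := by
  have hlow : (0 : Int) ≤ (if (k : Int) ≥ 5 then (k : Int) - 5 else 0) := by split <;> omega
  have hrf := pyRfindChar_eq L c k (if (k : Int) ≥ 5 then (k : Int) - 5 else 0) hlow
  simp only [fA, hrf]
  cases hocc : lastOcc L c k with
  | none => simp [rfSpec]
  | some j =>
    have hjk := lastOcc_lt L c k j hocc
    have hcond : ((if (k : Int) ≥ 5 then (k : Int) - 5 else 0) ≤ (j : Int)) ↔ ((k : Int) - (j : Int) ≤ 5) := by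
      split <;> omega
    simp only [rfSpec, gBonus]
    by_cases hgap : (k : Int) - (j : Int) ≤ 5
    · rw [if_pos (hcond.mpr hgap)]
      have hne : (((j : Nat) : Int) == -1) = false := by
        rw [beq_eq_false_iff_ne]; omega
      simp [hne, hgap]
    · rw [if_neg (fun h => hgap (hcond.mp h))]
      simp [hgap]

-- lastOcc only reads indices below k, so appending does not change it
theorem lastOcc_append (L : List Char) (a c : Char) (k : Nat) (hk : k ≤ L.length) :
    lastOcc (L ++ [a]) c k = lastOcc L c k := by
  induction k with
  | zero => rfl
  | succ k ih =>
    have hlt : k < L.length := by omega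
    simp only [lastOcc, List.getD_append _ _ _ _ hlt, ih (by omega)]

theorem occI_append (L : List Char) (a c : Char) :
    occI (L ++ [a]) c = occI L c ++ (if a == c then [(L.length : Int)] else []) := by
  simp only [occI, PySem.List.enumerate_append, List.filter_append, List.map_append]
  congr 1
  by_cases hac : a = c
  · simp [PySem.List.enumerate_cons, PySem.List.enumerate_nil, List.filter, hac]
  · have hacb : (a == c) = false := by simpa using hac
    simp [PySem.List.enumerate_cons, PySem.List.enumerate_nil, List.filter, hacb]

theorem getLast?_occI (L : List Char) (c : Char) :
    (occI L c).getLast? = (lastOcc L c L.length).map (fun j => ((j : Nat) : Int)) := by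
  induction L using List.reverseRecOn with
  | nil => rfl
  | append_singleton L a ih =>
    rw [occI_append]
    have hlen : (L ++ [a]).length = L.length + 1 := by simp
    rw [hlen]
    have hget : (L ++ [a]).getD L.length ' ' = a := by
      simp [List.getD]
    simp only [lastOcc, hget]
    by_cases hac : a == c
    · rw [if_pos hac, if_pos hac]
      simp
    · rw [if_neg (by simpa using hac), if_neg (by simpa using hac)]
      rw [lastOcc_append L a c L.length (le_refl _), List.append_nil]
      exact ih

theorem zip_tail_append (ps : List Int) (x : Int) :
    (ps ++ [x]).zip (ps ++ [x]).tail =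
      ps.zip ps.tail ++ (match ps.getLast? with | some p => [(p, x)] | none => []) := by
  induction ps with
  | nil => simp
  | cons p ps ih =>
    cases ps with
    | nil => simp
    | cons q qs =>
      simp only [List.cons_append, List.tail_cons, List.zip_cons_cons] at *
      rw [ih]
      simp

theorem amt_append (ps : List Int) (x : Int) :
    amt (ps ++ [x]) = amt ps + (match ps.getLast? with | some p => gBonus p x | none => 0) := by
  simp only [amt, zip_tail_append, List.map_append, List.sum_append]
  cases ps.getLast? <;> simp

-- B's inner loop is the sum of gBonus over the pairs
theorem foldl_gstep (l : List (Int × Int)) (r : Int) :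
    l.foldl (fun r q => if q.2 - q.1 ≤ 5 then r + (5 - (q.2 - q.1 - 1) * 1) else r) r
      = r + (l.map (fun q => gBonus q.1 q.2)).sum := by
  have h : (fun (r : Int) (q : Int × Int) => if q.2 - q.1 ≤ 5 then r + (5 - (q.2 - q.1 - 1) * 1) else r)
      = fun r q => r + gBonus q.1 q.2 := by
    funext r q; simp only [gBonus]; split <;> ring
  rw [h, PySem.List.foldl_add]

-- A's loop is the sum of fA over enumerate
theorem foldl_Astep (L : List Char) (l : List (Int × Char)) (r : Int) :
    l.foldl (fun result p =>
        let lower : Int := if p.1 ≥ 5 then p.1 - 5 else 0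
        let last := pyRfindChar L p.2 lower p.1
        if last == -1 then result
        else result + (5 - (p.1 - last - 1) * 1)) r
      = r + (l.map (fA L)).sum := by
  have h : (fun (result : Int) (p : Int × Char) =>
        let lower : Int := if p.1 ≥ 5 then p.1 - 5 else 0
        let last := pyRfindChar L p.2 lower p.1
        if last == -1 then result
        else result + (5 - (p.1 - last - 1) * 1))
      = fun result p => result + fA L p := by
    funext result p; simp only [fA]; split <;> split <;> ring
  rw [h, PySem.List.foldl_add]

-- B's outer loop is the sum of amt over the groups
theorem foldl_outer (vs : List (List Int)) (r : Int) :
    vs.foldl (fun result ps =>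
        (ps.zip (PySem.List.slice ps (some 1) none)).foldl
          (fun r q => if q.2 - q.1 ≤ 5 then r + (5 - (q.2 - q.1 - 1) * 1) else r)
          result) r
      = r + (vs.map amt).sum := by
  have h : (fun (result : Int) (ps : List Int) =>
        (ps.zip (PySem.List.slice ps (some 1) none)).foldl
          (fun r q => if q.2 - q.1 ≤ 5 then r + (5 - (q.2 - q.1 - 1) * 1) else r)
          result)
      = fun result ps => result + amt ps := by
    funext result ps
    rw [PySem.List.slice_from_one, foldl_gstep]
    rfl
  rw [h, PySem.List.foldl_add]

-- the grouping fold collects, under each character, its ordered positions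
theorem getD_fold_occ (l : List (Int × Char)) (d : PySem.Dict Char (List Int)) (c : Char) :
    (l.foldl (fun (d : PySem.Dict Char (List Int)) p => d.modify p.2 [] (fun ps => ps ++ [p.1])) d).getD c []
      = d.getD c [] ++ ((l.filter (fun p => p.2 == c)).map (·.1)) := by
  induction l generalizing d with
  | nil => simp
  | cons p l ih =>
    rw [List.foldl_cons, ih, PySem.Dict.getD_modify]
    by_cases hc : c = p.2
    · subst hc
      rw [if_pos rfl, List.filter_cons, if_pos (by simp)]
      simp
    · rw [if_neg hc, List.filter_cons, if_neg (by simpa using Ne.symm hc)]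

-- changing f at exactly one element of a nodup list shifts the sum by δ
theorem sum_map_update (K : List Char) (f f' : Char → Int) (a : Char) (δ : Int)
    (hnd : K.Nodup) (ha : a ∈ K)
    (hne : ∀ c ∈ K, c ≠ a → f' c = f c) (hfa : f' a = f a + δ) :
    (K.map f').sum = (K.map f).sum + δ := by
  induction K with
  | nil => cases ha
  | cons k K ih =>
    rcases List.mem_cons.mp ha with h | h
    · subst h
      have hKne : ∀ c ∈ K, f' c = f c := fun c hc =>
        hne c (List.mem_cons_of_mem _ hc) (fun he => (List.nodup_cons.mp hnd).1 (he ▸ hc))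
      simp only [List.map_cons, List.sum_cons, hfa, List.map_congr_left hKne]
      ring
    · have hka : k ≠ a := fun he => (List.nodup_cons.mp hnd).1 (he ▸ h)
      simp only [List.map_cons, List.sum_cons,
        hne k (List.mem_cons_self) hka,
        ih (List.nodup_cons.mp hnd).2 h
          (fun c hc => hne c (List.mem_cons_of_mem _ hc))]
      ring

-- MAIN: the grouped pair-sum equals the per-index rfind sum
theorem main_sum (L : List Char) : ∀ (K : List Char), K.Nodup → (∀ c ∈ L, c ∈ K) →
    (K.map (fun c => amt (occI L c))).sum = ((PySem.List.enumerate L 0).map (fA L)).sum := by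
  induction L using List.reverseRecOn with
  | nil =>
    intro K _ _
    simp [occI, amt, PySem.List.enumerate_nil]
  | append_singleton L a ih =>
    intro K hnd hsub
    have hsubL : ∀ c ∈ L, c ∈ K := fun c hc => hsub c (List.mem_append_left _ hc)
    have haK : a ∈ K := hsub a (List.mem_append_right _ (List.mem_singleton_self a))
    set δ : Int := (match lastOcc L a L.length with
      | some j => gBonus (j : Int) (L.length : Int)
      | none => 0) with hδ
    have hL : (K.map (fun c => amt (occI (L ++ [a]) c))).sum
        = (K.map (fun c => amt (occI L c))).sum + δ := by
      apply sum_map_update K _ _ a δ hnd haK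
      · intro c _ hca
        rw [occI_append, if_neg (by simpa using (Ne.symm hca)), List.append_nil]
      · rw [occI_append, if_pos (by simp), amt_append, getLast?_occI, hδ]
        cases lastOcc L a L.length <;> simp
    rw [hL, ih K hnd hsubL]
    -- right-hand side
    rw [PySem.List.enumerate_append, List.map_append, List.sum_append]
    have h1 : (PySem.List.enumerate L 0).map (fA (L ++ [a])) = (PySem.List.enumerate L 0).map (fA L) := by
      apply List.map_congr_left
      intro p hp
      rcases (PySem.List.mem_enumerate_iff L 0 p).mp hp with ⟨k, hk, rfl⟩
      have h0 : (0 : Int) + (k : Int) = (k : Int) := by ring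
      rw [h0, fA_eq, fA_eq, lastOcc_append L a _ k (le_of_lt hk)]
    have h2 : (PySem.List.enumerate [a] (0 + (L.length : Int))).map (fA (L ++ [a])) = [δ] := by
      simp only [PySem.List.enumerate_cons, PySem.List.enumerate_nil, List.map_cons, List.map_nil]
      have h0 : (0 : Int) + (L.length : Int) = ((L.length : Nat) : Int) := by ring
      rw [h0, fA_eq, lastOcc_append L a a L.length (le_refl _), hδ]
    rw [h1, h2]
    simp

-- ===== VERDICT (by name: the statement is the Claim_ definition above) =====
theorem calculate_total_runtime_spec : Claim_equal_calculate_total_runtime := by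
  intro jobs _
  unfold Spec_calculate_total_runtime calculate_total_runtime calculate_total_runtime_alt
  simp only []
  set L := jobs.toList with hL
  rw [foldl_Astep, foldl_outer]
  congr 1
  set d := (PySem.List.enumerate L 0).foldl
      (fun (d : PySem.Dict Char (List Int)) p => d.modify p.2 [] (fun ps => ps ++ [p.1]))
      PySem.Dict.empty with hd
  have hkeys : d.keys = PySem.Set.ofList L := by
    rw [hd, PySem.Dict.keys_foldl_modify_key (key := Prod.snd)]
    rw [PySem.Dict.keys_empty, PySem.Set.update_nil_left, PySem.List.map_snd_enumerate]
  have hnd : d.keys.Nodup := by rw [hkeys]; exact PySem.Set.nodup_ofList L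
  have hvals : d.values = d.keys.map (fun c => d.getD c []) :=
    PySem.Dict.values_eq_map_keys d hnd []
  have hgetD : ∀ c, d.getD c [] = occI L c := by
    intro c
    rw [hd, getD_fold_occ, PySem.Dict.getD_empty, List.nil_append]
    rfl
  rw [hvals, List.map_map]
  have hcomp : ((fun c => amt (d.getD c [])) : Char → Int) = fun c => amt (occI L c) := by
    funext c; rw [hgetD]
  rw [Function.comp_def]
  simp only [hgetD]
  rw [hkeys]
  exact (main_sum L (PySem.Set.ofList L) (PySem.Set.nodup_ofList L)
    (fun c hc => (PySem.Set.mem_ofList L c).mpr hc)).symm
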